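-- pv_equiv track=rewrite | github.com/Rezme-Inc/incentive_agent | agents/gap_analyzer.py | _check_program_type_coverage
-- ===== SOURCE A (Python) =====
-- from typing import Dict, List, Any, Optional, Set
--
-- EXPECTED_PROGRAM_TYPES = [
--     "tax_credit",
--     "wage_subsidy",
--     "wage_reimbursement",
--     "training_grant",
--     "bonding",
--     "ojt",  # On-the-job training
-- ]
--
-- def _check_program_type_coverage(programs: List[Dict[str, Any]]) -> Dict[str, bool]:
--     """Check which program types are covered"""
--     coverage = {ptype: False for ptype in EXPECTED_PROGRAM_TYPES}
--
--     for program in programs: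
--         # Only skip hallucinations
--         if program.get("status_tag") == "HALLUCINATION":
--             continue
--
--         benefit_type = program.get("benefit_type", "").lower()
--         program_type = program.get("program_type", "").lower()
--         program_name = program.get("program_name", "").lower()
--         description = program.get("description", "").lower()
--
--         types_text = f"{benefit_type} {program_type} {program_name} {description}"
--
--         type_keywords = {
--             "tax_credit": ["tax credit", "credit against", "tax incentive"],
--             "wage_subsidy": ["wage subsidy", "wage reimbursement", "subsidize wages"],
--             "wage_reimbursement": ["reimburse", "reimbursement", "wage offset"],
--             "training_grant": ["training grant", "training fund", "training incentive"],
--             "bonding": ["bond", "bonding", "fidelity"],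
--             "ojt": ["ojt", "on-the-job training", "on the job training"]
--         }
--
--         for prog_type, keywords in type_keywords.items():
--             for keyword in keywords:
--                 if keyword in types_text:
--                     coverage[prog_type] = True
--                     break
--
--     return coverage
-- ===== SOURCE B (Python) =====
-- from typing import Dict, List, Any
--
-- EXPECTED_PROGRAM_TYPES = [
--     "tax_credit",
--     "wage_subsidy",
--     "wage_reimbursement",
--     "training_grant",
--     "bonding",
--     "ojt",
-- ]
--
-- TYPE_KEYWORDS = {
--     "tax_credit": ["tax credit", "credit against", "tax incentive"],
--     "wage_subsidy": ["wage subsidy", "wage reimbursement", "subsidize wages"],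
--     "wage_reimbursement": ["reimburse", "reimbursement", "wage offset"],
--     "training_grant": ["training grant", "training fund", "training incentive"],
--     "bonding": ["bond", "bonding", "fidelity"],
--     "ojt": ["ojt", "on-the-job training", "on the job training"],
-- }
--
-- def _check_program_type_coverage(programs: List[Dict[str, Any]]) -> Dict[str, bool]:
--     # Concatenate all relevant program texts into ONE newline-separated document;
--     # since no keyword contains a newline, a keyword occurs in the document iff it
--     # occurs in some individual program's text, so each keyword is tested only once.
--     parts = []
--     for program in programs:
--         if program.get("status_tag") == "HALLUCINATION":
--             continue
--         parts.append(" ".join([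
--             program.get("benefit_type", "").lower(),
--             program.get("program_type", "").lower(),
--             program.get("program_name", "").lower(),
--             program.get("description", "").lower(),
--         ]))
--     blob = "\n".join(parts)
--     return {ptype: any(kw in blob for kw in TYPE_KEYWORDS[ptype])
--             for ptype in EXPECTED_PROGRAM_TYPES}
-- ===== Notes on version B (the rewrite author's own statement) =====
-- stated objective: alternative
-- what changed: B concatenates all non-hallucinated program texts into one newline-joined document and tests each of the 18 keywords exactly once against it (correct since no keyword contains a newline), instead of A's per-program inner scan over the keyword table mutating a coverage dict.
import Mathlib
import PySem

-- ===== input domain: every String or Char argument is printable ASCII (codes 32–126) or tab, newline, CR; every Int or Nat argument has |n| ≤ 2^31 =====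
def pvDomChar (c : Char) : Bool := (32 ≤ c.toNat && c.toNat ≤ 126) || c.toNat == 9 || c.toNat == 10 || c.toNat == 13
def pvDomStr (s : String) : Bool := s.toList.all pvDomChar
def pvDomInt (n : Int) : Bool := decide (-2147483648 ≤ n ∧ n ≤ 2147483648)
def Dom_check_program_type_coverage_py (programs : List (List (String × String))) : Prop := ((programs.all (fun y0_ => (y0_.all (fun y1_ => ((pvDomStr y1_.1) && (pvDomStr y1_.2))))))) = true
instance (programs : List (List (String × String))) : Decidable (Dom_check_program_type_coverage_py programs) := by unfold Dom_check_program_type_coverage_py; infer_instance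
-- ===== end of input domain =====

-- B builds ONE newline-joined document from all non-hallucinated program texts and tests each
-- keyword once against it (correct because no keyword contains a newline), instead of A's
-- per-program scan mutating a coverage dict (alternative algorithm, same exact return value).


-- ===== PORT A =====
-- EXPECTED_PROGRAM_TYPES (module constant)
def pvExpected : List String :=
  ["tax_credit", "wage_subsidy", "wage_reimbursement", "training_grant", "bonding", "ojt"]

-- the type_keywords literal dict built inside A's loop (also B's module constant TYPE_KEYWORDS)
def pvTypeKeywords : List (String × List String) :=
  [ ("tax_credit", ["tax credit", "credit against", "tax incentive"]),
    ("wage_subsidy", ["wage subsidy", "wage reimbursement", "subsidize wages"]),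
    ("wage_reimbursement", ["reimburse", "reimbursement", "wage offset"]),
    ("training_grant", ["training grant", "training fund", "training incentive"]),
    ("bonding", ["bond", "bonding", "fidelity"]),
    ("ojt", ["ojt", "on-the-job training", "on the job training"]) ]

-- f"{benefit_type} {program_type} {program_name} {description}" with the four .get(...,"").lower()
def pvTextA (program : List (String × String)) : String :=
  let d := PySem.Dict.mk program
  PySem.Str.lower (d.getD "benefit_type" "") ++ " " ++
  PySem.Str.lower (d.getD "program_type" "") ++ " " ++
  PySem.Str.lower (d.getD "program_name" "") ++ " " ++
  PySem.Str.lower (d.getD "description" "")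

-- inner 'for keyword in keywords: if keyword in types_text: coverage[ptype]=True; break'
def pvStepA (text : String) (cov : PySem.Dict String Bool) : PySem.Dict String Bool :=
  pvTypeKeywords.foldl
    (fun cov pr => if pr.2.any (fun kw => PySem.Str.isIn kw text) then cov.insert pr.1 true else cov)
    cov

def check_program_type_coverage_py (programs : List (List (String × String))) : List (String × Bool) :=
  let cov0 : PySem.Dict String Bool := pvExpected.foldl (fun d t => d.insert t false) PySem.Dict.empty
  (programs.foldl
    (fun cov program =>
      if (PySem.Dict.mk program).get? "status_tag" == some "HALLUCINATION" then cov
      else pvStepA (pvTextA program) cov)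
    cov0).items

-- ===== PORT B =====
-- " ".join of the four .get(...,"").lower() fields (same string as A's f-string)
def pvTextB (program : List (String × String)) : String :=
  let d := PySem.Dict.mk program
  PySem.Str.join " "
    [ PySem.Str.lower (d.getD "benefit_type" ""),
      PySem.Str.lower (d.getD "program_type" ""),
      PySem.Str.lower (d.getD "program_name" ""),
      PySem.Str.lower (d.getD "description" "") ]

def check_program_type_coverage_py_alt (programs : List (List (String × String))) : List (String × Bool) :=
  let parts := (programs.filter
      (fun program => !((PySem.Dict.mk program).get? "status_tag" == some "HALLUCINATION"))).map pvTextB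
  let blob := PySem.Str.join "\n" parts
  pvExpected.map (fun ptype =>
    (ptype, ((PySem.Dict.mk pvTypeKeywords).getD ptype []).any (fun kw => PySem.Str.isIn kw blob)))

-- ===== PRECONDITION & SPEC =====
def Spec_check_program_type_coverage_py (programs : List (List (String × String))) (out : List (String × Bool)) : Prop := out = check_program_type_coverage_py_alt programs
instance (programs : List (List (String × String))) (out : List (String × Bool)) : Decidable (Spec_check_program_type_coverage_py programs out) := by unfold Spec_check_program_type_coverage_py; infer_instance

-- ===== CLAIM (what is proved, stated in full; the proofs are below) =====
def Claim_equal_check_program_type_coverage_py : Prop := ∀ (programs : List (List (String × String))), Dom_check_program_type_coverage_py programs → Spec_check_program_type_coverage_py programs (check_program_type_coverage_py programs)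

-- ===== LEMMAS AND PROOFS =====

-- the two text constructions build the same string
theorem pvText_eq (p : List (String × String)) : pvTextB p = pvTextA p := by
  unfold pvTextA pvTextB
  apply String.ext
  simp [PySem.Str.join, PySem.Chars.join_cons_cons, PySem.Chars.join_singleton]

-- does `text` contain a keyword of `t`?
def pvHit (t : String) (text : String) : Bool :=
  ((PySem.Dict.mk pvTypeKeywords).getD t []).any (fun kw => PySem.Str.isIn kw text)

-- A's per-type coverage over the list of program texts
def pvCovers (t : String) (texts : List String) : Bool :=
  texts.any (fun text => pvHit t text)

-- splitting an infix across a separator element it does not contain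
theorem pv_infix_append_cons {kw xs ys : List Char} {c : Char} (hc : c ∉ kw) :
    kw <:+: xs ++ c :: ys ↔ kw <:+: xs ∨ kw <:+: ys := by
  constructor
  · rintro ⟨s, t, h⟩
    by_cases h1 : s.length + kw.length ≤ xs.length
    · left
      have hp : s ++ kw <+: xs := by
        apply List.prefix_of_prefix_length_le (l₃ := xs ++ c :: ys)
        · rw [← h]; exact List.prefix_append _ _
        · exact List.prefix_append _ _
        · simpa using h1
      obtain ⟨u, hu⟩ := hp
      exact ⟨s, u, by rw [← hu, List.append_assoc]⟩
    · by_cases h2 : xs.length + 1 ≤ s.length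
      · right
        have hlen := congrArg List.length h
        simp at hlen
        have hs : kw ++ t <:+ ys := by
          apply List.suffix_of_suffix_length_le (l₃ := xs ++ c :: ys)
          · rw [← h, List.append_assoc]; exact List.suffix_append _ _
          · exact ⟨xs ++ [c], by simp⟩
          · simp; omega
        obtain ⟨u, hu⟩ := hs
        exact ⟨u, t, by rw [← hu, List.append_assoc]⟩
      · exfalso
        apply hc
        simp only [not_le] at h1 h2
        have hA : (xs ++ c :: ys)[xs.length]? = some c := by
          rw [List.getElem?_append_right (Nat.le_refl _)]; simp
        rw [← h, List.append_assoc,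
          List.getElem?_append_right (by omega),
          List.getElem?_append_left (by omega)] at hA
        exact List.mem_of_getElem? hA
  · rintro (⟨u, v, huv⟩ | ⟨u, v, huv⟩)
    · exact ⟨u, v ++ c :: ys, by rw [← huv]; simp⟩
    · exact ⟨xs ++ c :: u, v, by rw [← huv]; simp⟩

-- a separator-free nonempty keyword occurs in the joined document iff it occurs in some part
theorem pv_isIn_join (kw : List Char) (c : Char) (hc : c ∉ kw) (hne : kw ≠ [])
    (texts : List (List Char)) :
    PySem.Chars.isIn kw (PySem.Chars.join [c] texts) = texts.any (fun t => PySem.Chars.isIn kw t) := by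
  induction texts with
  | nil =>
    rw [PySem.Chars.join_nil, List.any_nil, PySem.Chars.isIn_eq_false_iff]
    intro hinf
    exact hne (List.eq_nil_of_infix_nil hinf)
  | cons x rest ih =>
    cases rest with
    | nil => rw [PySem.Chars.join_singleton]; simp
    | cons y r =>
      rw [PySem.Chars.join_cons_cons,
        show x ++ [c] ++ PySem.Chars.join [c] (y :: r)
           = x ++ c :: PySem.Chars.join [c] (y :: r) from by simp]
      rw [Bool.eq_iff_iff, PySem.Chars.isIn_iff_infix, pv_infix_append_cons hc,
        ← PySem.Chars.isIn_iff_infix, ← PySem.Chars.isIn_iff_infix, ih]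
      simp only [List.any_cons, Bool.or_eq_true]

-- lifted to strings joined by "\n"
theorem pv_isIn_blob (kw : String) (hc : '\n' ∉ kw.toList) (hne : kw.toList ≠ [])
    (parts : List String) :
    PySem.Str.isIn kw (PySem.Str.join "\n" parts) = parts.any (fun p => PySem.Str.isIn kw p) := by
  rw [PySem.Str.isIn_eq, PySem.Str.toList_join,
    show ("\n" : String).toList = ['\n'] from rfl,
    pv_isIn_join _ _ hc hne, List.any_map]
  simp [PySem.Str.isIn_eq, Function.comp_def]

-- swapping the scan order: parts-then-keywords equals keywords-once-against-the-blob
theorem pv_swap (L : List String) (parts : List String)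
    (hk : ∀ kw ∈ L, '\n' ∉ kw.toList ∧ kw.toList ≠ []) :
    parts.any (fun p => L.any (fun kw => PySem.Str.isIn kw p))
      = L.any (fun kw => PySem.Str.isIn kw (PySem.Str.join "\n" parts)) := by
  rw [Bool.eq_iff_iff]
  simp only [List.any_eq_true]
  constructor
  · rintro ⟨p, hp, kw, hkw, hin⟩
    exact ⟨kw, hkw, by
      rw [pv_isIn_blob kw (hk kw hkw).1 (hk kw hkw).2]
      exact List.any_eq_true.mpr ⟨p, hp, hin⟩⟩
  · rintro ⟨kw, hkw, hin⟩
    rw [pv_isIn_blob kw (hk kw hkw).1 (hk kw hkw).2] at hin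
    obtain ⟨p, hp, hh⟩ := List.any_eq_true.mp hin
    exact ⟨p, hp, kw, hkw, hh⟩

-- per expected type: A's per-text scan equals one test against the blob
theorem pvHit_blob (t : String) (parts : List String)
    (hk : ∀ kw ∈ (PySem.Dict.mk pvTypeKeywords).getD t [], '\n' ∉ kw.toList ∧ kw.toList ≠ []) :
    pvCovers t parts = pvHit t (PySem.Str.join "\n" parts) := by
  unfold pvCovers pvHit
  exact pv_swap _ parts hk

-- A's inner pass over type_keywords, on the concrete six-key dict shape
set_option maxHeartbeats 2000000 in
theorem pvStepA_items (b1 b2 b3 b4 b5 b6 : Bool) (text : String) :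
    pvStepA text (PySem.Dict.mk
      [("tax_credit", b1), ("wage_subsidy", b2), ("wage_reimbursement", b3),
       ("training_grant", b4), ("bonding", b5), ("ojt", b6)]) =
    PySem.Dict.mk
      [("tax_credit", b1 || pvHit "tax_credit" text),
       ("wage_subsidy", b2 || pvHit "wage_subsidy" text),
       ("wage_reimbursement", b3 || pvHit "wage_reimbursement" text),
       ("training_grant", b4 || pvHit "training_grant" text),
       ("bonding", b5 || pvHit "bonding" text),
       ("ojt", b6 || pvHit "ojt" text)] := by
  have e1 : pvHit "tax_credit" text = List.any ["tax credit", "credit against", "tax incentive"] (fun kw => PySem.Str.isIn kw text) := by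
    simp only [pvHit]
    rw [show (PySem.Dict.mk pvTypeKeywords).getD "tax_credit" [] = ["tax credit", "credit against", "tax incentive"] from by decide]
  have e2 : pvHit "wage_subsidy" text = List.any ["wage subsidy", "wage reimbursement", "subsidize wages"] (fun kw => PySem.Str.isIn kw text) := by
    simp only [pvHit]
    rw [show (PySem.Dict.mk pvTypeKeywords).getD "wage_subsidy" [] = ["wage subsidy", "wage reimbursement", "subsidize wages"] from by decide]
  have e3 : pvHit "wage_reimbursement" text = List.any ["reimburse", "reimbursement", "wage offset"] (fun kw => PySem.Str.isIn kw text) := by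
    simp only [pvHit]
    rw [show (PySem.Dict.mk pvTypeKeywords).getD "wage_reimbursement" [] = ["reimburse", "reimbursement", "wage offset"] from by decide]
  have e4 : pvHit "training_grant" text = List.any ["training grant", "training fund", "training incentive"] (fun kw => PySem.Str.isIn kw text) := by
    simp only [pvHit]
    rw [show (PySem.Dict.mk pvTypeKeywords).getD "training_grant" [] = ["training grant", "training fund", "training incentive"] from by decide]
  have e5 : pvHit "bonding" text = List.any ["bond", "bonding", "fidelity"] (fun kw => PySem.Str.isIn kw text) := by
    simp only [pvHit]
    rw [show (PySem.Dict.mk pvTypeKeywords).getD "bonding" [] = ["bond", "bonding", "fidelity"] from by decide]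
  have e6 : pvHit "ojt" text = List.any ["ojt", "on-the-job training", "on the job training"] (fun kw => PySem.Str.isIn kw text) := by
    simp only [pvHit]
    rw [show (PySem.Dict.mk pvTypeKeywords).getD "ojt" [] = ["ojt", "on-the-job training", "on the job training"] from by decide]
  simp only [pvStepA, pvTypeKeywords, List.foldl_cons, List.foldl_nil, e1, e2, e3, e4, e5, e6]
  split_ifs <;> simp_all [PySem.Dict.insert, PySem.Dict.contains]

-- main loop invariant: folding A's program loop from any six-bool state
theorem pvLoop (programs : List (List (String × String))) (b1 b2 b3 b4 b5 b6 : Bool) :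
    (programs.foldl
      (fun cov program =>
        if (PySem.Dict.mk program).get? "status_tag" == some "HALLUCINATION" then cov
        else pvStepA (pvTextA program) cov)
      (PySem.Dict.mk
        [("tax_credit", b1), ("wage_subsidy", b2), ("wage_reimbursement", b3),
         ("training_grant", b4), ("bonding", b5), ("ojt", b6)])) =
    (let texts := (programs.filter
        (fun program => !((PySem.Dict.mk program).get? "status_tag" == some "HALLUCINATION"))).map pvTextB
     PySem.Dict.mk
      [("tax_credit", b1 || pvCovers "tax_credit" texts),
       ("wage_subsidy", b2 || pvCovers "wage_subsidy" texts),
       ("wage_reimbursement", b3 || pvCovers "wage_reimbursement" texts),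
       ("training_grant", b4 || pvCovers "training_grant" texts),
       ("bonding", b5 || pvCovers "bonding" texts),
       ("ojt", b6 || pvCovers "ojt" texts)]) := by
  induction programs generalizing b1 b2 b3 b4 b5 b6 with
  | nil => simp [pvCovers]
  | cons p ps ih =>
    rw [List.foldl_cons]
    by_cases h : ((PySem.Dict.mk p).get? "status_tag" == some "HALLUCINATION") = true
    · rw [if_pos h, ih]
      simp [h, pvCovers]
    · simp only [Bool.not_eq_true] at h
      rw [if_neg (by simp [h]), pvStepA_items, ih]
      simp [h, pvCovers, pvText_eq, Bool.or_assoc]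

-- ===== VERDICT (by name: the statement is the Claim_ definition above) =====
theorem check_program_type_coverage_py_spec : Claim_equal_check_program_type_coverage_py := by
  intro programs _
  unfold Spec_check_program_type_coverage_py
  simp only [check_program_type_coverage_py, check_program_type_coverage_py_alt]
  rw [show (pvExpected.foldl (fun d t => d.insert t false) PySem.Dict.empty : PySem.Dict String Bool)
      = PySem.Dict.mk [("tax_credit", false), ("wage_subsidy", false), ("wage_reimbursement", false),
          ("training_grant", false), ("bonding", false), ("ojt", false)] from rfl]
  rw [pvLoop]
  simp only [Bool.false_or]
  rw [pvHit_blob "tax_credit" _ (by decide), pvHit_blob "wage_subsidy" _ (by decide),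
      pvHit_blob "wage_reimbursement" _ (by decide), pvHit_blob "training_grant" _ (by decide),
      pvHit_blob "bonding" _ (by decide), pvHit_blob "ojt" _ (by decide)]
  simp [pvExpected, pvHit]
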